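-- pv_equiv track=rewrite | github.com/GundalaNikhil/DSA | dsa-problems/Tries/solutions/TRI-004-replace-words-shortest-rare-prefix.py | replace_naive
-- ===== SOURCE A (Python) =====
-- def replace_naive(dictionary, sentence):
--     words = sentence.split()
--     result = []
--
--     for word in words:
--         best_root = word
--         best_rarity = float('inf')
--
--         for root, rarity in dictionary.items():
--             if word.startswith(root):
--                 if rarity < best_rarity or (rarity == best_rarity and len(root) < len(best_root)):
--                     best_root = root
--                     best_rarity = rarity
--
--         result.append(best_root)
--
--     return ' '.join(result)
-- ===== SOURCE B (Python) =====
-- def replace_naive(dictionary, sentence):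
--     limit = 0
--     for root in dictionary:
--         limit = max(limit, len(root))
--
--     def best(word):
--         choice, rarity = word, None
--         for i in range(min(len(word), limit) + 1):
--             r = dictionary.get(word[:i])
--             if r is not None and (rarity is None or r < rarity):
--                 choice, rarity = word[:i], r
--         return choice
--
--     return ' '.join(best(w) for w in sentence.split())
-- ===== Notes on version B (the rewrite author's own statement) =====
-- stated objective: alternative
-- what changed: Instead of scanning the whole dictionary for every word (startswith test per root), B walks each word's prefixes up to the longest root length and does one hash lookup per prefix; scanning prefixes by increasing length makes 'strictly smaller rarity' reproduce A's (rarity, length) tie-break without comparing lengths.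
import Mathlib
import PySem

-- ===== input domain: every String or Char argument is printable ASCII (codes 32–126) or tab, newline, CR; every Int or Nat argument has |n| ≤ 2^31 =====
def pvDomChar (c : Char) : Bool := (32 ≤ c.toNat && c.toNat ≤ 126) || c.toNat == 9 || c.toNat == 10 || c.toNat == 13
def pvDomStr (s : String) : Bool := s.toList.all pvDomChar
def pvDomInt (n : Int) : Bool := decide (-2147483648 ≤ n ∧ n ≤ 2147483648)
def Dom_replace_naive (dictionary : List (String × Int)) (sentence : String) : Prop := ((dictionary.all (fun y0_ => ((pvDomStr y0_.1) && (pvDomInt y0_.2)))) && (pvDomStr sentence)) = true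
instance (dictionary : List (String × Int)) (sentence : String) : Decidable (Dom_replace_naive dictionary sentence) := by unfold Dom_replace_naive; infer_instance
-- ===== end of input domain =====

-- B replaces A's per-word scan of the whole dictionary by one dict lookup per prefix of the word,
-- capped at the longest root length (prefixes visited in increasing length, so 'strictly smaller
-- rarity' realizes A's tie-break); objective: alternative.

-- ===== PORT A =====
def replace_naive (dictionary : List (String × Int)) (sentence : String) : String :=
  let d := PySem.Dict.ofList dictionary
  let words := PySem.Str.split₀ sentence
  let result : List String :=
    words.foldl (fun acc word =>
      let best := d.items.foldl
        (fun (s : String × Option Int) c =>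
          if PySem.Str.startswith word c.1 then
            match s.2 with
            | none => (c.1, some c.2)          -- rarity < float('inf')
            | some br =>
              if c.2 < br ∨ (c.2 = br ∧ c.1.toList.length < s.1.toList.length) then (c.1, some c.2) else s
          else s)
        (word, (none : Option Int))
      acc ++ [best.1]) []
  PySem.Str.join " " result

-- ===== PORT B =====
-- B's helper best(word): walk the prefixes word[:i], i = 0..min(len(word), limit), one dict lookup each.
def pvBestPrefix (d : PySem.Dict String Int) (limit : Int) (word : String) : String :=
  let s := (PySem.List.pyRange 0 (min (PySem.Str.len word) limit + 1)).foldl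
    (fun (s : String × Option Int) i =>
      let p := String.ofList (PySem.List.slice word.toList none (some i))
      match d.get? p, s.2 with
      | some r, none => (p, some r)
      | some r, some br => if r < br then (p, some r) else s
      | none, _ => s)
    (word, (none : Option Int))
  s.1

def replace_naive_alt (dictionary : List (String × Int)) (sentence : String) : String :=
  let d := PySem.Dict.ofList dictionary
  let limit : Int := d.keys.foldl (fun m root => max m (PySem.Str.len root)) 0
  PySem.Str.join " " ((PySem.Str.split₀ sentence).map (pvBestPrefix d limit))

-- ===== PRECONDITION & SPEC =====
def Spec_replace_naive (dictionary : List (String × Int)) (sentence : String) (out : String) : Prop := out = replace_naive_alt dictionary sentence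
instance (dictionary : List (String × Int)) (sentence : String) (out : String) : Decidable (Spec_replace_naive dictionary sentence out) := by unfold Spec_replace_naive; infer_instance

-- ===== CLAIM (what is proved, stated in full; the proofs are below) =====
def Claim_equal_replace_naive : Prop := ∀ (dictionary : List (String × Int)) (sentence : String), Dom_replace_naive dictionary sentence → Spec_replace_naive dictionary sentence (replace_naive dictionary sentence)


-- ===== LEMMAS AND PROOFS =====

-- A's inner-loop step, restricted to the candidates (roots that are prefixes of the word).
def pvStepA (s : String × Option Int) (c : String × Int) : String × Option Int :=
  match s.2 with
  | none => (c.1, some c.2)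
  | some br =>
    if c.2 < br ∨ (c.2 = br ∧ c.1.toList.length < s.1.toList.length) then (c.1, some c.2) else s

-- B's step on an already-materialised candidate (prefix, rarity).
def pvStepB (s : String × Option Int) (c : String × Int) : String × Option Int :=
  match s.2 with
  | none => (c.1, some c.2)
  | some br => if c.2 < br then (c.1, some c.2) else s

lemma pvStepA_none (s : String × Option Int) (c : String × Int) (h : s.2 = none) :
    pvStepA s c = (c.1, some c.2) := by
  obtain ⟨b, o⟩ := s; simp only at h; subst h; rfl

lemma pvStepA_some (s : String × Option Int) (c : String × Int) (r : Int) (h : s.2 = some r) :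
    pvStepA s c =
      if c.2 < r ∨ (c.2 = r ∧ c.1.toList.length < s.1.toList.length) then (c.1, some c.2) else s := by
  obtain ⟨b, o⟩ := s; simp only at h; subst h; rfl

lemma pvStepB_none (s : String × Option Int) (c : String × Int) (h : s.2 = none) :
    pvStepB s c = (c.1, some c.2) := by
  obtain ⟨b, o⟩ := s; simp only at h; subst h; rfl

lemma pvStepB_some (s : String × Option Int) (c : String × Int) (r : Int) (h : s.2 = some r) :
    pvStepB s c = if c.2 < r then (c.1, some c.2) else s := by
  obtain ⟨b, o⟩ := s; simp only at h; subst h; rfl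

-- What both folds compute: the state is (word, none) iff there is no candidate, else a candidate
-- that is minimal for the lexicographic key (rarity, length of root).
def pvSpecSt (w : String) (l : List (String × Int)) (s : String × Option Int) : Prop :=
  (l = [] ∧ s = (w, none)) ∨
  ∃ r, s.2 = some r ∧ (s.1, r) ∈ l ∧
    ∀ c ∈ l, r < c.2 ∨ (r = c.2 ∧ s.1.toList.length ≤ c.1.toList.length)

lemma pvSpec_stepA (w : String) (l : List (String × Int)) :
    pvSpecSt w l (l.foldl pvStepA (w, none)) := by
  induction l using List.reverseRecOn with
  | nil => exact Or.inl ⟨rfl, rfl⟩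
  | append_singleton l c ih =>
    rw [List.foldl_append, List.foldl_cons, List.foldl_nil]
    rcases ih with ⟨hl, hs⟩ | ⟨r, hr, hmem, hmin⟩
    · subst hl
      rw [hs, pvStepA_none _ _ rfl]
      refine Or.inr ⟨c.2, rfl, by simp, ?_⟩
      rintro c' hc'
      dsimp only
      simp only [List.nil_append, List.mem_singleton] at hc'
      subst hc'
      exact Or.inr ⟨rfl, le_refl _⟩
    · rw [pvStepA_some _ _ r hr]
      split_ifs with hb
      · refine Or.inr ⟨c.2, rfl, by simp, ?_⟩
        intro c' hc'
        dsimp only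
        rcases List.mem_append.1 hc' with h | h
        · rcases hmin c' h with h' | ⟨h1, h2⟩
          · left; rcases hb with h'' | ⟨h'', _⟩ <;> omega
          · rcases hb with h'' | ⟨h'', hlen⟩
            · left; omega
            · right; exact ⟨by omega, by omega⟩
        · simp only [List.mem_singleton] at h; subst h
          exact Or.inr ⟨rfl, le_refl _⟩
      · refine Or.inr ⟨r, hr, List.mem_append_left _ hmem, ?_⟩
        intro c' hc'
        rcases List.mem_append.1 hc' with h | h
        · exact hmin c' h
        · simp only [List.mem_singleton] at h; subst h
          by_cases h' : r < c'.2
          · exact Or.inl h'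
          · have hb1 : r ≤ c'.2 := by by_contra hcon; exact hb (Or.inl (by omega))
            have hcr : c'.2 = r := le_antisymm (le_of_not_gt h') hb1
            have hlen : ¬ c'.1.toList.length < (List.foldl pvStepA (w, none) l).1.toList.length := by
              intro hl
              exact hb (Or.inr ⟨hcr, hl⟩)
            exact Or.inr ⟨hcr.symm, by omega⟩

lemma pvSpec_stepB (w : String) (l : List (String × Int))
    (hsorted : l.Pairwise (fun a b => a.1.toList.length < b.1.toList.length)) :
    pvSpecSt w l (l.foldl pvStepB (w, none)) := by
  induction l using List.reverseRecOn with
  | nil => exact Or.inl ⟨rfl, rfl⟩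
  | append_singleton l c ih =>
    rw [List.pairwise_append] at hsorted
    obtain ⟨hp, -, hlt⟩ := hsorted
    have hltc : ∀ a ∈ l, a.1.toList.length < c.1.toList.length := fun a ha =>
      hlt a ha c (by simp)
    rw [List.foldl_append, List.foldl_cons, List.foldl_nil]
    rcases ih hp with ⟨hl, hs⟩ | ⟨r, hr, hmem, hmin⟩
    · subst hl
      rw [hs, pvStepB_none _ _ rfl]
      refine Or.inr ⟨c.2, rfl, by simp, ?_⟩
      rintro c' hc'
      dsimp only
      simp only [List.nil_append, List.mem_singleton] at hc'
      subst hc'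
      exact Or.inr ⟨rfl, le_refl _⟩
    · rw [pvStepB_some _ _ r hr]
      split_ifs with hb
      · refine Or.inr ⟨c.2, rfl, by simp, ?_⟩
        intro c' hc'
        dsimp only
        rcases List.mem_append.1 hc' with h | h
        · rcases hmin c' h with h' | ⟨h1, _⟩ <;> left <;> omega
        · simp only [List.mem_singleton] at h; subst h
          exact Or.inr ⟨rfl, le_refl _⟩
      · refine Or.inr ⟨r, hr, List.mem_append_left _ hmem, ?_⟩
        intro c' hc'
        rcases List.mem_append.1 hc' with h | h
        · exact hmin c' h
        · simp only [List.mem_singleton] at h; subst h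
          by_cases h' : r < c'.2
          · exact Or.inl h'
          · have hcr : c'.2 = r := by omega
            have hlenlt := hltc _ hmem
            exact Or.inr ⟨hcr.symm, le_of_lt hlenlt⟩

-- the spec determines the state uniquely when all candidates are prefixes of w
lemma pvSpec_unique (w : String) (l1 l2 : List (String × Int)) (s1 s2 : String × Option Int)
    (hmem : ∀ c, c ∈ l1 ↔ c ∈ l2)
    (hpref : ∀ c ∈ l1, c.1.toList <+: w.toList)
    (h1 : pvSpecSt w l1 s1) (h2 : pvSpecSt w l2 s2) : s1 = s2 := by
  rcases h1 with ⟨hl1, hs1⟩ | ⟨r1, hr1, hmem1, hmin1⟩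
  · rcases h2 with ⟨hl2, hs2⟩ | ⟨r2, hr2, hmem2, hmin2⟩
    · rw [hs1, hs2]
    · exact absurd ((hmem _).2 hmem2) (by simp [hl1])
  · rcases h2 with ⟨hl2, hs2⟩ | ⟨r2, hr2, hmem2, hmin2⟩
    · exact absurd ((hmem _).1 hmem1) (by simp [hl2])
    · have m12 := hmin2 (s1.1, r1) ((hmem _).1 hmem1)
      have m21 := hmin1 (s2.1, r2) ((hmem _).2 hmem2)
      simp only at m12 m21
      have hr : r1 = r2 := by
        rcases m12 with h | ⟨h, _⟩ <;> rcases m21 with h' | ⟨h', _⟩ <;> omega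
      have hlen : s1.1.toList.length = s2.1.toList.length := by
        rcases m12 with h | ⟨h, h2'⟩ <;> rcases m21 with h' | ⟨h', h2''⟩ <;> omega
      have hp1 : s1.1.toList <+: w.toList := hpref _ hmem1
      have hp2 : s2.1.toList <+: w.toList := hpref _ ((hmem _).2 hmem2)
      have heq : s1.1.toList = s2.1.toList :=
        List.IsPrefix.eq_of_length
          (List.prefix_of_prefix_length_le hp1 hp2 (le_of_eq hlen)) hlen
      have hfst : s1.1 = s2.1 := String.toList_inj.1 heq
      have hsnd : s1.2 = s2.2 := by rw [hr1, hr2, hr]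
      exact Prod.ext hfst hsnd

-- B's loop over prefix indices is the pvStepB fold over the materialised candidate list
lemma pvFoldl_lookup (d : PySem.Dict String Int) (pref : Int → String)
    (is : List Int) (s : String × Option Int) :
    is.foldl (fun s i =>
        match d.get? (pref i), s.2 with
        | some r, none => (pref i, some r)
        | some r, some br => if r < br then (pref i, some r) else s
        | none, _ => s) s
      = (is.filterMap (fun i => (d.get? (pref i)).map (fun r => (pref i, r)))).foldl pvStepB s := by
  induction is generalizing s with
  | nil => rfl
  | cons i is ih =>
    rw [List.foldl_cons, List.filterMap_cons]
    rcases h : d.get? (pref i) with _ | r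
    · simp only [Option.map_none]
      exact ih s
    · simp only [Option.map_some, List.foldl_cons]
      have hstep : (match (some r : Option Int), s.2 with
          | some r, none => (pref i, some r)
          | some r, some br => if r < br then (pref i, some r) else s
          | none, _ => s) = pvStepB s (pref i, r) := by
        obtain ⟨b, o⟩ := s; rcases o with _ | br <;> rfl
      rw [hstep]
      exact ih _

-- the candidate list A filters out of the dictionary items
def pvCands (w : String) (d : PySem.Dict String Int) : List (String × Int) :=
  d.items.filter (fun c => PySem.Str.startswith w c.1)

-- the candidate list B materialises, in increasing prefix length
def pvL (w : String) (d : PySem.Dict String Int) (limit : Int) : List (String × Int) :=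
  (PySem.List.pyRange 0 (min (PySem.Str.len w) limit + 1)).filterMap
    (fun i => (d.get? (String.ofList (PySem.List.slice w.toList none (some i)))).map
      (fun r => (String.ofList (PySem.List.slice w.toList none (some i)), r)))

lemma pvPref_mk (w : String) (k : Nat) :
    (String.ofList (PySem.List.slice w.toList none (some (k : Int)))).toList = w.toList.take k := by
  rw [PySem.List.slice_to_natCast]
  exact String.toList_ofList

lemma pvMem_L (w : String) (d : PySem.Dict String Int) (limit : Int)
    (hnd : d.keys.Nodup) (hlim : ∀ k ∈ d.keys, PySem.Str.len k ≤ limit) (c : String × Int) :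
    c ∈ pvL w d limit ↔ c ∈ pvCands w d := by
  obtain ⟨c1, c2⟩ := c
  unfold pvL pvCands
  rw [List.mem_filterMap, List.mem_filter]
  constructor
  · rintro ⟨i, hi, hc⟩
    rcases Option.map_eq_some_iff.1 hc with ⟨r, hget, hcr⟩
    injection hcr with e1 e2
    subst e1; subst e2
    obtain ⟨h0i, hiu⟩ := (PySem.List.mem_pyRange_one).1 hi
    rw [PySem.Str.len_eq] at hiu
    refine ⟨PySem.Dict.mem_items_of_get?_eq_some d hget, ?_⟩
    have hi' : i = ((i.toNat : Nat) : Int) := by omega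
    rw [hi']
    simp only [PySem.Str.startswith, PySem.Chars.startswith]
    rw [pvPref_mk]
    exact List.isPrefixOf_iff_prefix.2 (List.take_prefix _ _)
  · rintro ⟨hitems, hsw⟩
    have hpref : c1.toList <+: w.toList := by
      simpa [PySem.Str.startswith, PySem.Chars.startswith, List.isPrefixOf_iff_prefix] using hsw
    have hklen : c1.toList.length ≤ w.toList.length := hpref.length_le
    have hkeys : c1 ∈ d.keys := PySem.Dict.mem_keys_of_mem_items d hitems
    have hlimc : PySem.Str.len c1 ≤ limit := hlim c1 hkeys
    rw [PySem.Str.len_eq] at hlimc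
    refine ⟨((c1.toList.length : Nat) : Int), ?_, ?_⟩
    · refine (PySem.List.mem_pyRange_one).2 ⟨by positivity, ?_⟩
      rw [PySem.Str.len_eq]
      omega
    · have hmk : String.ofList (PySem.List.slice w.toList none (some ((c1.toList.length : Nat) : Int))) = c1 := by
        apply String.toList_inj.1
        rw [pvPref_mk]
        exact (List.prefix_iff_eq_take.1 hpref).symm
      rw [hmk, PySem.Dict.get?_of_mem_items d hitems hnd]
      rfl

lemma pvPref_cands (w : String) (d : PySem.Dict String Int) :
    ∀ c ∈ pvCands w d, c.1.toList <+: w.toList := by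
  intro c hc
  have := (List.mem_filter.1 hc).2
  simpa [PySem.Str.startswith, PySem.Chars.startswith, List.isPrefixOf_iff_prefix] using this

lemma pvL_sorted (w : String) (d : PySem.Dict String Int) (limit : Int) :
    (pvL w d limit).Pairwise (fun a b => a.1.toList.length < b.1.toList.length) := by
  unfold pvL
  rw [List.pairwise_filterMap]
  have hpr : (PySem.List.pyRange 0 (min (PySem.Str.len w) limit + 1)).Pairwise (· < ·) := by
    rcases le_or_gt (min (PySem.Str.len w) limit + 1) 0 with hle | hgt
    · have : PySem.List.pyRange 0 (min (PySem.Str.len w) limit + 1) = [] := by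
        rw [List.eq_nil_iff_forall_not_mem]
        intro i hi
        obtain ⟨h1, h2⟩ := (PySem.List.mem_pyRange_one).1 hi
        omega
      rw [this]; exact List.Pairwise.nil
    · have h1 : min (PySem.Str.len w) limit + 1 = (((min (PySem.Str.len w) limit + 1).toNat : Nat) : Int) := by omega
      rw [h1, PySem.List.pyRange_zero_natCast]
      exact List.Pairwise.map _ (fun a b h => by exact_mod_cast h) List.pairwise_lt_range
  refine List.Pairwise.imp_of_mem ?_ hpr
  intro i j hi hj hij b hb b' hb'
  rcases Option.map_eq_some_iff.1 hb with ⟨r, _, hbr⟩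
  rcases Option.map_eq_some_iff.1 hb' with ⟨r', _, hbr'⟩
  subst hbr; subst hbr'
  obtain ⟨h0i, hiu⟩ := (PySem.List.mem_pyRange_one).1 hi
  obtain ⟨h0j, hju⟩ := (PySem.List.mem_pyRange_one).1 hj
  rw [PySem.Str.len_eq] at hiu hju
  have hi' : i = ((i.toNat : Nat) : Int) := by omega
  have hj' : j = ((j.toNat : Nat) : Int) := by omega
  rw [hi', hj', pvPref_mk, pvPref_mk]
  simp only [List.length_take]
  omega

-- the per-word results agree
lemma pvBest_eq (w : String) (d : PySem.Dict String Int) (limit : Int)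
    (hnd : d.keys.Nodup) (hlim : ∀ k ∈ d.keys, PySem.Str.len k ≤ limit) :
    ((pvCands w d).foldl pvStepA (w, none)).1 = pvBestPrefix d limit w := by
  unfold pvBestPrefix
  rw [pvFoldl_lookup d (fun i => String.ofList (PySem.List.slice w.toList none (some i)))]
  have huniq := pvSpec_unique w (pvCands w d) (pvL w d limit)
    ((pvCands w d).foldl pvStepA (w, none))
    ((pvL w d limit).foldl pvStepB (w, none))
    (fun c => (pvMem_L w d limit hnd hlim c).symm)
    (pvPref_cands w d)
    (pvSpec_stepA w _)
    (pvSpec_stepB w _ (pvL_sorted w d limit))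
  rw [huniq]
  rfl

-- ===== VERDICT (by name: the statement is the Claim_ definition above) =====
theorem replace_naive_spec : Claim_equal_replace_naive := by
  intro dictionary sentence _
  unfold Spec_replace_naive
  simp only [replace_naive, replace_naive_alt]
  have hinner : ∀ (word : String),
      ((PySem.Dict.ofList dictionary).items.foldl
        (fun (s : String × Option Int) (c : String × Int) =>
          if PySem.Str.startswith word c.1 then
            match s.2 with
            | none => (c.1, some c.2)
            | some br =>
              if c.2 < br ∨ (c.2 = br ∧ c.1.toList.length < s.1.toList.length) then (c.1, some c.2) else s
          else s) (word, (none : Option Int))).1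
      = pvBestPrefix (PySem.Dict.ofList dictionary)
          ((PySem.Dict.ofList dictionary).keys.foldl (fun m root => max m (PySem.Str.len root)) 0) word := by
    intro word
    have hstep : (fun (s : String × Option Int) (c : String × Int) =>
        if PySem.Str.startswith word c.1 then
          match s.2 with
          | none => (c.1, some c.2)
          | some br =>
            if c.2 < br ∨ (c.2 = br ∧ c.1.toList.length < s.1.toList.length) then (c.1, some c.2) else s
        else s)
        = fun (s : String × Option Int) (c : String × Int) =>
            if PySem.Str.startswith word c.1 then pvStepA s c else s := by
      funext s c; rfl
    rw [hstep, PySem.List.foldl_if_eq_foldl_filter]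
    exact pvBest_eq word _ _ (PySem.Dict.nodup_keys_ofList dictionary)
      (fun k hk => (PySem.List.le_foldl_max_int (PySem.Dict.ofList dictionary).keys PySem.Str.len 0).2 k hk)
  rw [PySem.List.foldl_append_singleton_eq_map]
  rw [List.nil_append]
  congr 1
  exact List.map_congr_left (fun w _ => hinner w)
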